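-- pv_equiv track=rewrite | github.com/MotiWolff/Text-Analyzer | text_analyzer/utils.py | find_equal_length_sequences
-- ===== SOURCE A (Python) =====
-- PUNCTUATIONS = ".,:;!?\"'()[]{}"
--
-- def clean_text(data):
--     """Common function to clean and split words"""
--     words = data.split()
--     clean_words = [word.strip(PUNCTUATIONS).lower() for word in words if word.strip()]
--     return clean_words
--
-- def find_equal_length_sequences(data):
--     clean_words = clean_text(data)
--     sequences = []
--     current_seq = []
--     current_len = 0
--
--     for word in clean_words:
--         if current_len == 0:  # First word in potential sequence
--             current_seq = [word]
--             current_len = len(word)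
--         elif len(word) == current_len:  # Word with same length
--             current_seq.append(word)
--         else:  # Different length word
--             if len(current_seq) >= 2:  # If we found a valid sequence
--                 sequences.append(current_seq.copy())
--             current_seq = [word]
--             current_len = len(word)
--
--     # Check the last sequence
--     if len(current_seq) >= 2:
--         sequences.append(current_seq)
--
--     return sequences
-- ===== SOURCE B (Python) =====
-- PUNCTUATIONS = ".,:;!?\"'()[]{}"
--
-- def clean_text(data):
--     """Common function to clean and split words"""
--     words = data.split()
--     clean_words = [word.strip(PUNCTUATIONS).lower() for word in words if word.strip()]
--     return clean_words
--
-- def find_equal_length_sequences(data):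
--     # Staged index algorithm: compute the cut positions where the word length
--     # changes, then slice the word list at consecutive cuts and keep the
--     # slices that are genuine runs (>= 2 words of some positive length).
--     words = clean_text(data)
--     lens = [len(w) for w in words]
--     n = len(words)
--     cuts = [i for i in range(n + 1) if i == 0 or i == n or lens[i] != lens[i - 1]]
--     return [words[a:b] for a, b in zip(cuts, cuts[1:]) if b - a >= 2 and lens[a]]
-- ===== Notes on version B (the rewrite author's own statement) =====
-- stated objective: alternative
-- what changed: Replaced A's single-pass current_seq/current_len state machine by a staged index algorithm: compute word lengths, list the cut positions where the length changes, then slice the word list at consecutive cuts and keep slices of >= 2 nonempty words.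
import Mathlib
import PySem

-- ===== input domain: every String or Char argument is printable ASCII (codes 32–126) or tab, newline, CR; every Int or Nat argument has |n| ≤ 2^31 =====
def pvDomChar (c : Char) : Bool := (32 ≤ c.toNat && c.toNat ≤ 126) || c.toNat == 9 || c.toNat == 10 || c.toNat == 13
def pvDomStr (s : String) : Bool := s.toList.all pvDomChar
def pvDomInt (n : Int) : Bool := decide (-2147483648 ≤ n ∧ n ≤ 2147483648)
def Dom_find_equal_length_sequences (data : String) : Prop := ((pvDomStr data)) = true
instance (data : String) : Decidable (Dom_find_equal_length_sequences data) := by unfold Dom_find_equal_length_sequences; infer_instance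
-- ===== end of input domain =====

-- B replaces A's running current_seq/current_len state machine by a staged index
-- algorithm (length-change cut positions, then slicing); objective: alternative, same cost.

-- ===== PORT A =====
def pvPunct : String := ".,:;!?\"'()[]{}"

-- shared helper: both Pythons call the same clean_text
def cleanText (data : String) : List String :=
  let words := PySem.Str.split₀ data
  (words.filter (fun w => decide (PySem.Str.strip w ≠ ""))).map
    (fun w => PySem.Str.lower (PySem.Str.stripChars w pvPunct))

-- A's loop body: state (sequences, current_seq, current_len)
def stepA (s : List (List String) × List String × Int) (word : String) :
    List (List String) × List String × Int :=
  let (sequences, current_seq, current_len) := s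
  if current_len = 0 then (sequences, [word], PySem.Str.len word)
  else if PySem.Str.len word = current_len then (sequences, current_seq ++ [word], current_len)
  else ((if 2 ≤ current_seq.length then sequences ++ [current_seq] else sequences),
        [word], PySem.Str.len word)

def find_equal_length_sequences (data : String) : List (List String) :=
  let clean_words := cleanText data
  let (sequences, current_seq, _) := clean_words.foldl stepA ([], [], 0)
  if 2 ≤ current_seq.length then sequences ++ [current_seq] else sequences

-- ===== PORT B =====
-- B's body over the cleaned word list: cut positions where the length changes, then slices
def bRuns (words : List String) : List (List String) :=
  let lens := words.map PySem.Str.len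
  let n : Int := words.length
  let cuts := (PySem.List.pyRange 0 (n + 1) 1).filter
      (fun i => i == 0 || i == n ||
        !(PySem.List.pyGetD lens i 0 == PySem.List.pyGetD lens (i - 1) 0))
  (cuts.zip cuts.tail).filterMap (fun ab =>
    if 2 ≤ ab.2 - ab.1 ∧ PySem.List.pyGetD lens ab.1 0 ≠ 0 then
      some (PySem.List.slice words (some ab.1) (some ab.2))
    else none)

def find_equal_length_sequences_alt (data : String) : List (List String) :=
  bRuns (cleanText data)

-- ===== PRECONDITION & SPEC =====
def Spec_find_equal_length_sequences (data : String) (out : List (List String)) : Prop := out = find_equal_length_sequences_alt data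
instance (data : String) (out : List (List String)) : Decidable (Spec_find_equal_length_sequences data out) := by unfold Spec_find_equal_length_sequences; infer_instance

-- ===== CLAIM (what is proved, stated in full; the proofs are below) =====
def Claim_equal_find_equal_length_sequences : Prop := ∀ (data : String), Dom_find_equal_length_sequences data → Spec_find_equal_length_sequences data (find_equal_length_sequences data)

-- ===== LEMMAS AND PROOFS =====

-- canonical description shared by both proofs: runs of consecutive equal-length words
def attachRun (w : String) (runs : List (List String)) : List (List String) :=
  match runs with
  | (x :: r) :: rs =>
      if PySem.Str.len x = PySem.Str.len w then (w :: x :: r) :: rs else [w] :: (x :: r) :: rs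
  | _ => [[w]]

def runsByLen : List String → List (List String)
  | [] => []
  | w :: ws => attachRun w (runsByLen ws)

def keepRun (run : List String) : Bool :=
  decide (PySem.Str.len (run.headD "") ≠ 0) && decide (2 ≤ run.length)

-- ---- A-side: A's fold equals filter keepRun (runsByLen ·) ----

def attachCur (cur : List String) (clen : Int) (runs : List (List String)) :
    List (List String) :=
  match runs with
  | (x :: r) :: rs => if PySem.Str.len x = clen then (cur ++ x :: r) :: rs else cur :: (x :: r) :: rs
  | _ => [cur]

theorem runsByLen_ne_nil : ∀ (ws : List String), ∀ r ∈ runsByLen ws, r ≠ [] := by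
  intro ws
  induction ws with
  | nil => simp [runsByLen]
  | cons w ws ih =>
    intro r hr
    simp only [runsByLen] at hr
    rcases h : runsByLen ws with _ | ⟨_ | ⟨x, t⟩, rs⟩ <;> rw [h] at hr
    · simp only [attachRun] at hr
      simp at hr
      simp [hr]
    · simp only [attachRun] at hr
      simp at hr
      simp [hr]
    · simp only [attachRun] at hr
      split at hr
      · rcases List.mem_cons.mp hr with hr | hr
        · simp [hr]
        · exact ih _ (by rw [h]; exact List.mem_cons_of_mem _ hr)
      · rcases List.mem_cons.mp hr with hr | hr
        · simp [hr]
        · rcases List.mem_cons.mp hr with hr | hr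
          · simp [hr]
          · exact ih _ (by rw [h]; exact List.mem_cons_of_mem _ hr)

theorem filter_attachRun_zero (w : String) (runs : List (List String))
    (hw : PySem.Str.len w = 0) (hne : ∀ r ∈ runs, r ≠ []) :
    (attachRun w runs).filter keepRun = runs.filter keepRun := by
  have hw' : w = "" := by simpa using hw
  subst hw'
  rcases runs with _ | ⟨_ | ⟨x, t⟩, rs⟩
  · simp [attachRun, keepRun]
  · exact absurd rfl (hne [] (by simp))
  · simp only [attachRun]
    split_ifs with hx
    · have hx' : x = "" := by simpa using hx
      subst hx'
      simp [keepRun]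
    · simp [keepRun, List.filter_cons]

theorem attachCur_append (cur : List String) (clen : Int) (w : String)
    (runs : List (List String)) (hw : PySem.Str.len w = clen) :
    attachCur (cur ++ [w]) clen runs = attachCur cur clen (attachRun w runs) := by
  rcases runs with _ | ⟨_ | ⟨x, t⟩, rs⟩ <;>
    simp only [attachCur, attachRun] <;> split_ifs <;> simp_all

theorem attachCur_ne (cur : List String) (clen : Int) (w : String)
    (runs : List (List String)) (hw : PySem.Str.len w ≠ clen) :
    attachCur cur clen (attachRun w runs) = cur :: attachRun w runs := by
  rcases runs with _ | ⟨_ | ⟨x, t⟩, rs⟩ <;>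
    simp only [attachCur, attachRun] <;> split_ifs <;> simp_all

theorem attachCur_single (w : String) (runs : List (List String)) :
    attachCur [w] (PySem.Str.len w) runs = attachRun w runs := by
  rcases runs with _ | ⟨_ | ⟨x, t⟩, rs⟩ <;>
    simp only [attachCur, attachRun] <;> split_ifs <;> simp_all

-- the main loop invariant: A's fold from any well-formed state equals run-filtering
theorem loopA_eq (ws : List String) : ∀ (seqs : List (List String)) (cur : List String)
    (clen : Int),
    (clen = 0 → cur.length ≤ 1) →
    (clen ≠ 0 → cur ≠ [] ∧ PySem.Str.len (cur.headD "") = clen) →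
    (fun s : List (List String) × List String × Int =>
        if 2 ≤ s.2.1.length then s.1 ++ [s.2.1] else s.1) (ws.foldl stepA (seqs, cur, clen))
      = seqs ++ (if clen = 0 then runsByLen ws
                 else attachCur cur clen (runsByLen ws)).filter keepRun := by
  induction ws with
  | nil =>
    intro seqs cur clen h0 hn
    by_cases hc : clen = 0
    · subst hc
      have h1 := h0 rfl
      simp only [List.foldl_nil, if_pos rfl, runsByLen]
      rw [if_neg (by omega : ¬ 2 ≤ cur.length)]
      simp
    · obtain ⟨hcne, hhd⟩ := hn hc
      rcases cur with _ | ⟨c, cs⟩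
      · exact absurd rfl hcne
      have hhead : PySem.Str.len c = clen := by simpa using hhd
      have hne : c ≠ "" := by
        intro he; subst he; simp at hhead; omega
      have hk : keepRun (c :: cs) = decide (2 ≤ (c :: cs : List String).length) := by
        simp [keepRun, hne]
      simp only [List.foldl_nil, if_neg hc, runsByLen, attachCur, List.filter_cons, hk]
      split_ifs <;> simp_all
  | cons w ws ih =>
    intro seqs cur clen h0 hn
    by_cases hc : clen = 0
    · subst hc
      have hstep : stepA (seqs, cur, 0) w = (seqs, [w], PySem.Str.len w) := by
        simp [stepA]
      rw [List.foldl_cons, hstep]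
      by_cases hw : PySem.Str.len w = 0
      · rw [ih seqs [w] (PySem.Str.len w) (fun _ => by simp) (fun hnn => absurd hw hnn)]
        rw [if_pos hw, if_pos rfl]
        simp only [runsByLen]
        rw [filter_attachRun_zero w _ hw (runsByLen_ne_nil ws)]
      · rw [ih seqs [w] (PySem.Str.len w) (fun h => absurd h hw) (fun _ => ⟨by simp, by simp⟩)]
        rw [if_neg hw, if_pos rfl]
        simp only [runsByLen]
        rw [attachCur_single]
    · obtain ⟨hcne, hhd⟩ := hn hc
      rcases cur with _ | ⟨c, cs⟩
      · exact absurd rfl hcne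
      have hhead : PySem.Str.len c = clen := by simpa using hhd
      have hne : c ≠ "" := by
        intro he; subst he; simp at hhead; omega
      have hk : keepRun (c :: cs) = decide (2 ≤ (c :: cs : List String).length) := by
        simp [keepRun, hne]
      by_cases hw : PySem.Str.len w = clen
      · have hw' : (w.length : Int) = clen := by simpa using hw
        have hstep : stepA (seqs, c :: cs, clen) w = (seqs, (c :: cs) ++ [w], clen) := by
          simp [stepA, hc, hw']
        rw [List.foldl_cons, hstep]
        rw [ih seqs ((c :: cs) ++ [w]) clen (fun h => absurd h hc)
              (fun _ => ⟨by simp, by rw [List.cons_append]; simpa using hhead⟩)]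
        rw [if_neg hc, if_neg hc]
        simp only [runsByLen]
        rw [attachCur_append _ _ _ _ hw]
      · have hw' : ¬ (w.length : Int) = clen := by simpa using hw
        have hstep : stepA (seqs, c :: cs, clen) w =
            ((if 2 ≤ (c :: cs : List String).length then seqs ++ [c :: cs] else seqs),
             [w], PySem.Str.len w) := by
          simp [stepA, hc, hw']
        rw [List.foldl_cons, hstep]
        by_cases hw0 : PySem.Str.len w = 0
        · rw [ih _ [w] (PySem.Str.len w) (fun _ => by simp) (fun hnn => absurd hw0 hnn)]
          rw [if_pos hw0, if_neg hc]
          simp only [runsByLen]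
          rw [attachCur_ne _ _ _ _ hw, List.filter_cons, hk,
              filter_attachRun_zero w _ hw0 (runsByLen_ne_nil ws)]
          split_ifs <;> simp_all
        · rw [ih _ [w] (PySem.Str.len w) (fun h => absurd h hw0) (fun _ => ⟨by simp, by simp⟩)]
          rw [if_neg hw0, if_neg hc]
          simp only [runsByLen]
          rw [attachCur_single, attachCur_ne _ _ _ _ hw, List.filter_cons, hk]
          split_ifs <;> simp_all

-- ---- B-side: the cut/slice pipeline equals filter keepRun (runsByLen ·) ----

-- the span characterisation of runsByLen
theorem runsByLen_cons_span (w : String) (tl : List String) :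
    runsByLen (w :: tl)
      = (w :: tl.takeWhile (fun x => decide (PySem.Str.len x = PySem.Str.len w)))
          :: runsByLen (tl.dropWhile (fun x => decide (PySem.Str.len x = PySem.Str.len w))) := by
  induction tl generalizing w with
  | nil => simp [runsByLen, attachRun]
  | cons y ys ih =>
    by_cases hy : PySem.Str.len y = PySem.Str.len w
    · have hpred : (fun x => decide (PySem.Str.len x = PySem.Str.len y))
          = (fun x => decide (PySem.Str.len x = PySem.Str.len w)) := by
        funext x; rw [hy]
      have hih := ih y
      rw [hpred] at hih
      show attachRun w (runsByLen (y :: ys)) = _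
      rw [hih]
      simp only [attachRun]
      rw [if_pos hy]
      rw [List.takeWhile_cons, List.dropWhile_cons]
      rw [if_pos (by simpa using hy), if_pos (by simpa using hy)]
    · have hih := ih y
      show attachRun w (runsByLen (y :: ys)) = _
      rw [hih]
      simp only [attachRun]
      rw [if_neg hy]
      rw [List.takeWhile_cons, List.dropWhile_cons]
      rw [if_neg (by simpa using hy), if_neg (by simpa using hy)]
      rw [hih]

-- natural-number cut positions (proof-side mirror of B's cuts)
def qCut (ws : List String) (k : Nat) : Bool :=
  decide (k = 0) || decide (k = ws.length) ||
    !((ws.map PySem.Str.len).getD k 0 == (ws.map PySem.Str.len).getD (k - 1) 0)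

def natCuts (ws : List String) : List Nat :=
  (List.range (ws.length + 1)).filter (qCut ws)

def natPipeline (ws : List String) : List (List String) :=
  ((natCuts ws).zip (natCuts ws).tail).filterMap (fun ab =>
    if ab.1 + 2 ≤ ab.2 ∧ (ws.map PySem.Str.len).getD ab.1 0 ≠ 0 then
      some ((ws.drop ab.1).take (ab.2 - ab.1))
    else none)

theorem natCuts_head (ws : List String) : natCuts ws = 0 :: (natCuts ws).tail := by
  unfold natCuts
  rw [List.range_succ_eq_map, List.filter_cons]
  have h0 : qCut ws 0 = true := by simp [qCut]
  simp [h0]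

-- all indices i ≤ (takeWhile …).length of w :: tl carry length (len w)
theorem getD_len_run (w : String) (tl : List String) (i : Nat)
    (hi : i ≤ (tl.takeWhile (fun x => decide (PySem.Str.len x = PySem.Str.len w))).length) :
    ((w :: tl).map PySem.Str.len).getD i 0 = PySem.Str.len w := by
  cases i with
  | zero => simp
  | succ i' =>
    have hi' : i' < (tl.takeWhile (fun x => decide (PySem.Str.len x = PySem.Str.len w))).length := by
      omega
    have hsplit : tl = tl.takeWhile (fun x => decide (PySem.Str.len x = PySem.Str.len w))
        ++ tl.dropWhile (fun x => decide (PySem.Str.len x = PySem.Str.len w)) :=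
      (List.takeWhile_append_dropWhile).symm
    simp only [List.map_cons, List.getD_cons_succ]
    conv_lhs => rw [hsplit]
    rw [List.map_append, List.getD_append _ _ _ _ (by simpa using hi')]
    rw [List.getD_eq_getElem _ _ (by simpa using hi')]
    have hmem : (tl.takeWhile (fun x => decide (PySem.Str.len x = PySem.Str.len w)))[i'] ∈
        tl.takeWhile (fun x => decide (PySem.Str.len x = PySem.Str.len w)) :=
      List.getElem_mem _
    have := List.mem_takeWhile_imp hmem
    simp only [List.getElem_map]
    simpa using this

theorem qCut_lt (w : String) (tl : List String) (j : Nat) (h1 : 1 ≤ j)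
    (h2 : j < (tl.takeWhile (fun x => decide (PySem.Str.len x = PySem.Str.len w))).length + 1) :
    qCut (w :: tl) j = false := by
  have hK : (tl.takeWhile (fun x => decide (PySem.Str.len x = PySem.Str.len w))).length
      ≤ tl.length := (List.takeWhile_sublist _).length_le
  have e1 := getD_len_run w tl j (by omega)
  have e2 := getD_len_run w tl (j - 1) (by omega)
  simp only [qCut, e1, e2]
  simp only [List.length_cons]
  have : ¬ (j = 0) := by omega
  have hne : ¬ (j = tl.length + 1) := by omega
  simp [this, hne]

theorem qCut_shift (w : String) (tl : List String) (j : Nat)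
    (hj : j ≤ (tl.dropWhile (fun x => decide (PySem.Str.len x = PySem.Str.len w))).length) :
    qCut (w :: tl) ((tl.takeWhile (fun x => decide (PySem.Str.len x = PySem.Str.len w))).length + 1 + j)
      = qCut (tl.dropWhile (fun x => decide (PySem.Str.len x = PySem.Str.len w))) j := by
  have hsplit : tl = tl.takeWhile (fun x => decide (PySem.Str.len x = PySem.Str.len w))
      ++ tl.dropWhile (fun x => decide (PySem.Str.len x = PySem.Str.len w)) :=
    (List.takeWhile_append_dropWhile).symm
  set t := tl.takeWhile (fun x => decide (PySem.Str.len x = PySem.Str.len w)) with ht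
  set r := tl.dropWhile (fun x => decide (PySem.Str.len x = PySem.Str.len w)) with hr
  have hlen : tl.length = t.length + r.length := by
    conv_lhs => rw [hsplit]
    simp
  have hws : (w :: tl) = (w :: t) ++ r := by
    rw [List.cons_append]
    exact congrArg _ hsplit
  have hright : ∀ m : Nat, t.length + 1 ≤ m →
      ((w :: tl).map PySem.Str.len).getD m 0 = (r.map PySem.Str.len).getD (m - (t.length + 1)) 0 := by
    intro m hm
    conv_lhs => rw [hws]
    rw [List.map_append, List.getD_append_right _ _ _ _ (by simpa using hm)]
    simp
  cases Nat.eq_zero_or_pos j with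
  | inl hj0 =>
    subst hj0
    have hrhs : qCut r 0 = true := by simp [qCut]
    rw [hrhs]
    rcases hr' : r with _ | ⟨r0, rr⟩
    · have : qCut (w :: tl) (t.length + 1 + 0) = true := by
        simp only [qCut, List.length_cons]
        have : t.length + 1 + 0 = tl.length + 1 := by
          rw [hr'] at hlen; simp at hlen; omega
        simp [this]
      rw [this]
    · -- interior boundary: length changes at the start of r
      have hr0 : PySem.Str.len r0 ≠ PySem.Str.len w := by
        have := List.head?_dropWhile_not (fun x => decide (PySem.Str.len x = PySem.Str.len w)) tl
        rw [← hr, hr'] at this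
        simpa using this
      have e1 : ((w :: tl).map PySem.Str.len).getD (t.length + 1 + 0) 0 = PySem.Str.len r0 := by
        rw [hright _ (by omega)]
        simp [hr']
      have e2 : ((w :: tl).map PySem.Str.len).getD (t.length + 1 + 0 - 1) 0 = PySem.Str.len w :=
        getD_len_run w tl _ (by rw [← ht]; omega)
      simp only [qCut, e1, e2]
      simp
      exact Or.inr (by simpa using hr0)
  | inr hjpos =>
    have e1 : ((w :: tl).map PySem.Str.len).getD (t.length + 1 + j) 0
        = (r.map PySem.Str.len).getD j 0 := by
      rw [hright _ (by omega)]; congr 1; omega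
    have e2 : ((w :: tl).map PySem.Str.len).getD (t.length + 1 + j - 1) 0
        = (r.map PySem.Str.len).getD (j - 1) 0 := by
      rw [hright _ (by omega)]; congr 1; omega
    simp only [qCut, e1, e2, List.length_cons]
    congr 1
    congr 1
    · exact decide_eq_decide.mpr (by omega)
    · exact decide_eq_decide.mpr (by omega)

theorem natCuts_cons (w : String) (tl : List String) :
    natCuts (w :: tl)
      = 0 :: (natCuts (tl.dropWhile (fun x => decide (PySem.Str.len x = PySem.Str.len w)))).map
          (fun j => (tl.takeWhile (fun x => decide (PySem.Str.len x = PySem.Str.len w))).length + 1 + j) := by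
  set t := tl.takeWhile (fun x => decide (PySem.Str.len x = PySem.Str.len w)) with ht
  set r := tl.dropWhile (fun x => decide (PySem.Str.len x = PySem.Str.len w)) with hr
  have hsplit : tl = t ++ r := (List.takeWhile_append_dropWhile).symm
  have hlen : tl.length = t.length + r.length := by
    conv_lhs => rw [hsplit]
    simp
  have hLK : (w :: tl).length + 1 = (t.length + 1) + (r.length + 1) := by
    simp only [List.length_cons]; omega
  unfold natCuts
  rw [hLK, List.range_add, List.filter_append]
  have hfirst : (List.range (t.length + 1)).filter (qCut (w :: tl)) = [0] := by
    rw [List.range_succ_eq_map, List.filter_cons]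
    have h0 : qCut (w :: tl) 0 = true := by simp [qCut]
    rw [List.filter_map]
    have hnil : (List.range t.length).filter (qCut (w :: tl) ∘ Nat.succ) = [] := by
      rw [List.filter_eq_nil_iff]
      intro a ha
      have ha' : a < t.length := List.mem_range.mp ha
      simp only [Function.comp]
      rw [qCut_lt w tl (a + 1) (by omega) (by rw [← ht]; omega)]
      simp
    rw [hnil]
    simp [h0]
  have hsecond : ((List.range (r.length + 1)).map (fun x => t.length + 1 + x)).filter (qCut (w :: tl))
      = (natCuts r).map (fun j => t.length + 1 + j) := by
    rw [List.filter_map]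
    have : (List.range (r.length + 1)).filter ((qCut (w :: tl)) ∘ (fun x => t.length + 1 + x))
        = (List.range (r.length + 1)).filter (qCut r) := by
      apply List.filter_congr
      intro j hjmem
      have hj : j ≤ r.length := by
        have := List.mem_range.mp hjmem; omega
      simp only [Function.comp]
      rw [qCut_shift w tl j (by rw [← hr]; omega)]
    rw [this]
    unfold natCuts
    rfl
  rw [hfirst, hsecond]
  rfl

-- the Int-level cut list of port B is the cast of natCuts
theorem cuts_eq (ws : List String) :
    (PySem.List.pyRange 0 ((ws.length : Int) + 1) 1).filter
      (fun i => i == (0 : Int) || i == (ws.length : Int) ||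
        !(PySem.List.pyGetD (ws.map PySem.Str.len) i 0
            == PySem.List.pyGetD (ws.map PySem.Str.len) (i - 1) 0))
      = (natCuts ws).map (fun k : Nat => (k : Int)) := by
  rw [PySem.List.pyRange_one]
  have htn : (((ws.length : Int) + 1) - 0).toNat = ws.length + 1 := by omega
  rw [htn]
  rw [List.filter_map]
  have : (List.range (ws.length + 1)).filter
      ((fun i : Int => i == (0 : Int) || i == (ws.length : Int) ||
        !(PySem.List.pyGetD (ws.map PySem.Str.len) i 0
            == PySem.List.pyGetD (ws.map PySem.Str.len) (i - 1) 0)) ∘ (fun k : Nat => (0 : Int) + k))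
      = natCuts ws := by
    unfold natCuts
    apply List.filter_congr
    intro k _
    simp only [Function.comp, zero_add]
    by_cases hk : k = 0
    · subst hk
      simp [qCut]
    · have hc1 : ((k : Int) == (0 : Int)) = decide (k = 0) := by
        by_cases h : k = 0
        · subst h; simp
        · have h' : ¬ ((k : Int) = 0) := by exact_mod_cast h
          simp [h, h']
      have hc2 : ((k : Int) == (ws.length : Int)) = decide (k = ws.length) := by
        by_cases h : k = ws.length
        · subst h; simp
        · have h' : ¬ ((k : Int) = (ws.length : Int)) := by exact_mod_cast h
          simp [h, h']
      have hm1 : (k : Int) - 1 = ((k - 1 : Nat) : Int) := by omega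
      rw [hc1, hc2, hm1]
      simp only [PySem.List.pyGetD_natCast, qCut]
  rw [this]
  apply List.map_congr_left
  intro k _
  exact zero_add _

theorem bRuns_eq_natPipeline (ws : List String) : bRuns ws = natPipeline ws := by
  unfold bRuns natPipeline
  simp only []
  rw [cuts_eq]
  rw [← List.map_tail, List.zip_map, List.filterMap_map]
  congr 1
  funext ab
  obtain ⟨a, b⟩ := ab
  simp only [Function.comp, Prod.map]
  rw [PySem.List.slice_natCast]
  simp only [PySem.List.pyGetD_natCast]
  apply if_congr _ rfl rfl
  constructor
  · rintro ⟨h1, h2⟩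
    exact ⟨by omega, by simpa using h2⟩
  · rintro ⟨h1, h2⟩
    exact ⟨by omega, by simpa using h2⟩

theorem natPipeline_eq : ∀ ws : List String, natPipeline ws = (runsByLen ws).filter keepRun
  | [] => by
    show _ = _
    rfl
  | w :: tl => by
    have ihr := natPipeline_eq
      (tl.dropWhile (fun x => decide (PySem.Str.len x = PySem.Str.len w)))
    set t := tl.takeWhile (fun x => decide (PySem.Str.len x = PySem.Str.len w)) with ht
    set r := tl.dropWhile (fun x => decide (PySem.Str.len x = PySem.Str.len w)) with hr
    have hsplit : tl = t ++ r := (List.takeWhile_append_dropWhile).symm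
    have hws : (w :: tl) = (w :: t) ++ r := by
      rw [List.cons_append]; exact congrArg _ hsplit
    have hKlen : (w :: t).length = t.length + 1 := by simp
    -- structure of the cut list
    have hcuts : natCuts (w :: tl) = 0 :: (natCuts r).map (fun j => t.length + 1 + j) :=
      natCuts_cons w tl
    have hhead : natCuts r = 0 :: (natCuts r).tail := natCuts_head r
    -- shift the pipeline function by t.length + 1
    have hshift : ∀ a b : Nat,
        (if (t.length + 1 + a) + 2 ≤ (t.length + 1 + b) ∧
            ((w :: tl).map PySem.Str.len).getD (t.length + 1 + a) 0 ≠ 0 then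
          some (((w :: tl).drop (t.length + 1 + a)).take ((t.length + 1 + b) - (t.length + 1 + a)))
        else none)
          = (if a + 2 ≤ b ∧ (r.map PySem.Str.len).getD a 0 ≠ 0 then
              some ((r.drop a).take (b - a)) else none) := by
      intro a b
      have hgd : ((w :: tl).map PySem.Str.len).getD (t.length + 1 + a) 0
          = (r.map PySem.Str.len).getD a 0 := by
        conv_lhs => rw [hws]
        rw [List.map_append, List.getD_append_right _ _ _ _ (by simp)]
        congr 1
        simp
      have hdrop : (w :: tl).drop (t.length + 1 + a) = r.drop a := by
        rw [← List.drop_drop, hws]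
        rw [show t.length + 1 = ((w :: t)).length by simp]
        rw [List.drop_left]
      have htake : (t.length + 1 + b) - (t.length + 1 + a) = b - a := by omega
      rw [hgd, hdrop, htake]
      apply if_congr _ rfl rfl
      constructor
      · rintro ⟨h1, h2⟩; exact ⟨by omega, h2⟩
      · rintro ⟨h1, h2⟩; exact ⟨by omega, h2⟩
    have hpairs : ((0 : Nat) :: (natCuts r).map (fun j => t.length + 1 + j)).zip
          (((0 : Nat) :: (natCuts r).map (fun j => t.length + 1 + j)).tail)
        = ((0 : Nat), t.length + 1 + 0)
            :: ((natCuts r).zip ((natCuts r).tail)).map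
              (Prod.map (fun j => t.length + 1 + j) (fun j => t.length + 1 + j)) := by
      rw [List.tail_cons]
      conv_lhs => rw [hhead]
      rw [List.map_cons, List.zip_cons_cons]
      congr 1
      conv_lhs => rw [show ((t.length + 1 + 0) :: ((natCuts r).tail).map (fun j => t.length + 1 + j))
          = ((0 : Nat) :: (natCuts r).tail).map (fun j => t.length + 1 + j) by rw [List.map_cons]]
      rw [← hhead, List.zip_map]
    unfold natPipeline
    rw [hcuts, hpairs]
    have htail : ((natCuts r).zip ((natCuts r).tail)).filterMap
        ((fun ab : Nat × Nat =>
          if ab.1 + 2 ≤ ab.2 ∧ ((w :: tl).map PySem.Str.len).getD ab.1 0 ≠ 0 then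
            some (((w :: tl).drop ab.1).take (ab.2 - ab.1))
          else none) ∘ Prod.map (fun j => t.length + 1 + j) (fun j => t.length + 1 + j))
        = natPipeline r := by
      unfold natPipeline
      congr 1
      funext ab
      obtain ⟨a, b⟩ := ab
      simp only [Function.comp, Prod.map]
      exact hshift a b
    have htake0 : ((w :: tl).drop 0).take ((t.length + 1 + 0) - 0) = w :: t := by
      rw [List.drop_zero]
      conv_lhs => rw [hws, show (t.length + 1 + 0) - 0 = ((w :: t)).length by simp]
      rw [List.take_left]
    -- the canonical side
    rw [runsByLen_cons_span w tl, ← ht, ← hr, List.filter_cons]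
    by_cases h0 : PySem.Str.len w = 0
    · rw [List.filterMap_cons_none (by rw [if_neg (fun hC => hC.2 (by simpa using h0))])]
      rw [List.filterMap_map, htail, ihr]
      rw [if_neg (by
        simp only [keepRun, List.headD_cons, List.length_cons, Bool.and_eq_true,
          decide_eq_true_eq]
        rintro ⟨hA, -⟩
        exact hA h0)]
    · by_cases h2 : 2 ≤ t.length + 1
      · rw [List.filterMap_cons_some (by rw [if_pos ⟨by omega, by simpa using h0⟩])]
        rw [htake0, List.filterMap_map, htail, ihr]
        rw [if_pos (by
          simp only [keepRun, List.headD_cons, List.length_cons, Bool.and_eq_true,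
            decide_eq_true_eq]
          exact ⟨h0, by omega⟩)]
      · rw [List.filterMap_cons_none (by rw [if_neg (fun hC => absurd hC.1 (by omega))])]
        rw [List.filterMap_map, htail, ihr]
        rw [if_neg (by
          simp only [keepRun, List.headD_cons, List.length_cons, Bool.and_eq_true,
            decide_eq_true_eq]
          rintro ⟨-, hB⟩
          exact h2 hB)]
termination_by ws => ws.length
decreasing_by
  simp only [List.length_cons]
  have := List.length_dropWhile_le (fun x => decide (PySem.Str.len x = PySem.Str.len w)) tl
  omega

-- ===== VERDICT (by name: the statement is the Claim_ definition above) =====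
theorem find_equal_length_sequences_spec : Claim_equal_find_equal_length_sequences := by
  intro data _
  unfold Spec_find_equal_length_sequences find_equal_length_sequences find_equal_length_sequences_alt
  rw [bRuns_eq_natPipeline, natPipeline_eq]
  have := loopA_eq (cleanText data) [] [] 0 (fun _ => by simp) (fun h => absurd rfl h)
  rw [if_pos rfl] at this
  simpa using this
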